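-- pv_equiv track=rewrite | github.com/Glubs9/Stutter | Lexer.py | split_brackets
-- ===== SOURCE A (Python) =====
-- def split_brackets(str_in):
--     prev = 0
--     ret = []
--     for n in range(len(str_in)):
--         if str_in[n] == "(" or str_in[n] == ")":
--             ret.append(str_in[prev:n])
--             ret.append(str_in[n])
--             prev = n+1
--     ret.append(str_in[prev:len(str_in)])
--     return ret
-- ===== SOURCE B (Python) =====
-- import re
--
-- def split_brackets(str_in):
--     return re.split(r'([()])', str_in)
-- ===== Notes on version B (the rewrite author's own statement) =====
-- stated objective: idiomatic
-- what changed: Replaces the manual index loop with prev-index tracking and repeated slicing by a single re.split with a capturing single-character class, which emits the fragments and each parenthesis token directly.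
import Mathlib
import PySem

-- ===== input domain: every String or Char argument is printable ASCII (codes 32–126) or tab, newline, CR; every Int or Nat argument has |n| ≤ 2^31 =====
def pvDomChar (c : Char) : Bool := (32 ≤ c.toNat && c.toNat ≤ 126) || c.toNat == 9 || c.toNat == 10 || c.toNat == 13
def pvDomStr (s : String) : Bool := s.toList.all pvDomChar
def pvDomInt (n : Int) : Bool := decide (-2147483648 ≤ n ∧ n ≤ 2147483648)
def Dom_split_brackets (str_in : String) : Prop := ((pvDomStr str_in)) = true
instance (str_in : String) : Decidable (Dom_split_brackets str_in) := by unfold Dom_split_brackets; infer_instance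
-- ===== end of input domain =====

-- B replaces A's index loop (prev-index tracking + slicing) by a regex split on a
-- capturing parenthesis class, ported as a single forward scan with a fragment accumulator.


-- ===== PORT A =====
-- loop body of A: state (prev, ret), index n, over the fixed character list cs
def sbStep (cs : List Char) (st : Int × List String) (n : Int) : Int × List String :=
  if PySem.List.pyGetD cs n ' ' = '(' ∨ PySem.List.pyGetD cs n ' ' = ')' then
    (n + 1, st.2 ++ [String.ofList (PySem.List.slice cs (some st.1) (some n)),
                     String.ofList [PySem.List.pyGetD cs n ' ']])
  else st

def split_brackets (str_in : String) : List String :=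
  let cs := str_in.toList
  let st := (PySem.List.pyRange 0 (cs.length : Int) 1).foldl (sbStep cs) (0, [])
  st.2 ++ [String.ofList (PySem.List.slice cs (some st.1) (some (cs.length : Int)))]

-- ===== PORT B =====
-- Source B is `re.split(r'([()])', str_in)`: the regex engine scans left to right, emitting the
-- fragment before each parenthesis, the parenthesis itself (captured), and the trailing
-- fragment; ported exactly as that scan with a reversed fragment accumulator.
def sbScan : List Char → List Char → List String
  | acc, [] => [String.ofList acc.reverse]
  | acc, c :: cs =>
    if c = '(' ∨ c = ')' then
      String.ofList acc.reverse :: String.ofList [c] :: sbScan [] cs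
    else sbScan (c :: acc) cs

def split_brackets_alt (str_in : String) : List String :=
  sbScan [] str_in.toList

-- ===== PRECONDITION & SPEC =====
def Spec_split_brackets (str_in : String) (out : List String) : Prop := out = split_brackets_alt str_in
instance (str_in : String) (out : List String) : Decidable (Spec_split_brackets str_in out) := by unfold Spec_split_brackets; infer_instance

-- ===== CLAIM (what is proved, stated in full; the proofs are below) =====
def Claim_equal_split_brackets : Prop := ∀ (str_in : String), Dom_split_brackets str_in → Spec_split_brackets str_in (split_brackets str_in)

-- ===== LEMMAS AND PROOFS =====

-- Invariant of A's loop: full = f1 ++ acc ++ rest, prev = |f1|, next index k = |f1| + |acc|.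
lemma sb_loop_eq (rest : List Char) : ∀ (f1 acc : List Char) (ret : List String)
    (full : List Char) (p k : Int),
    full = f1 ++ acc ++ rest → p = (f1.length : Int) → k = ((f1.length + acc.length : Nat) : Int) →
    (let st := (PySem.List.pyRange k (full.length : Int) 1).foldl (sbStep full) (p, ret)
     st.2 ++ [String.ofList (PySem.List.slice full (some st.1) (some (full.length : Int)))])
    = ret ++ sbScan acc.reverse rest := by
  induction rest with
  | nil =>
    intro f1 acc ret full p k hfull hp hk
    subst hfull hp hk
    simp only [List.append_nil]
    have hlen : ((f1 ++ acc).length : Int) = ((f1.length + acc.length : Nat) : Int) := by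
      simp
    rw [← hlen]
    have hempty : PySem.List.pyRange ((f1 ++ acc).length : Int) ((f1 ++ acc).length : Int) 1 = [] := by
      simp [PySem.List.pyRange]
    rw [hempty]
    simp only [List.foldl_nil, sbScan]
    rw [hlen, PySem.List.slice_natCast]
    simp
  | cons c rest ih =>
    intro f1 acc ret full p k hfull hp hk
    subst hfull hp hk
    have hk_lt : ((f1.length + acc.length : Nat) : Int) < ((f1 ++ acc ++ c :: rest).length : Int) := by
      simp
    rw [PySem.List.pyRange_one_cons hk_lt]
    simp only [List.foldl_cons]
    have hget : PySem.List.pyGetD (f1 ++ acc ++ c :: rest) ((f1.length + acc.length : Nat) : Int) ' ' = c := by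
      rw [PySem.List.pyGetD_natCast,
          show f1 ++ acc ++ c :: rest = (f1 ++ acc) ++ c :: rest by simp,
          show f1.length + acc.length = (f1 ++ acc).length by simp]
      simp [List.getD]
    have hdrop : (f1 ++ acc ++ c :: rest).drop f1.length = acc ++ c :: rest := by
      rw [show f1 ++ acc ++ c :: rest = f1 ++ (acc ++ c :: rest) by simp]
      exact List.drop_left
    by_cases hc : c = '(' ∨ c = ')'
    · have hstep : sbStep (f1 ++ acc ++ c :: rest) ((f1.length : Int), ret) ((f1.length + acc.length : Nat) : Int)
          = (((f1.length + acc.length : Nat) : Int) + 1,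
             ret ++ [String.ofList acc, String.ofList [c]]) := by
        unfold sbStep
        rw [hget, if_pos hc, PySem.List.slice_natCast, hdrop]
        simp [List.take_left']
      rw [hstep]
      have := ih (f1 ++ acc ++ [c]) [] (ret ++ [String.ofList acc, String.ofList [c]])
          (f1 ++ acc ++ c :: rest) ((f1.length + acc.length + 1 : Nat) : Int)
          ((f1.length + acc.length + 1 : Nat) : Int)
          (by simp) (by simp; omega) (by simp; omega)
      have hk1 : (((f1.length + acc.length : Nat) : Int) + 1) = ((f1.length + acc.length + 1 : Nat) : Int) := by
        push_cast; ring
      rw [hk1]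
      simpa [sbScan, hc] using this
    · have hstep : sbStep (f1 ++ acc ++ c :: rest) ((f1.length : Int), ret) ((f1.length + acc.length : Nat) : Int)
          = ((f1.length : Int), ret) := by
        unfold sbStep
        rw [hget, if_neg hc]
      rw [hstep]
      have := ih f1 (acc ++ [c]) ret (f1 ++ acc ++ c :: rest)
          ((f1.length : Int)) ((f1.length + acc.length + 1 : Nat) : Int)
          (by simp) rfl (by push_cast; simp; ring)
      have hk1 : (((f1.length + acc.length : Nat) : Int) + 1) = ((f1.length + acc.length + 1 : Nat) : Int) := by
        push_cast; ring
      rw [hk1, this]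
      simp [sbScan, hc]

theorem split_brackets_spec : Claim_equal_split_brackets := by
  intro s _
  unfold Spec_split_brackets split_brackets split_brackets_alt
  have := sb_loop_eq s.toList [] [] [] s.toList 0 0 (by simp) (by simp) (by simp)
  simpa using this
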